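-- pv_equiv track=rewrite | github.com/i960107/algorithm | leetcode/top-interview-150/math/BitwiseAndofNumbersRange_240201.py | rangeBitwiseAndFail
-- ===== SOURCE A (Python) =====
-- def rangeBitwiseAndFail(left: int, right: int) -> int:
--     if left == 0 or right == 0:
--         return 0
--     if left == right:
--         return left
--
--     def helper(n: int):
--         num = 1
--         count = 0
--         while num * 2 <= n:
--             count += 1
--             num = num * 2
--         return count
--
--     # 같은 구간에 있을때만 1 생김.
--     left_result = helper(left)
--     right_result = helper(right)
--     return 2 ** left_result if left_result == right_result else 0
-- ===== SOURCE B (Python) =====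
-- def rangeBitwiseAndFail(left: int, right: int) -> int:
--     if left == 0 or right == 0:
--         return 0
--     if left == right:
--         return left
--     # Halve both numbers in lockstep, doubling an accumulator; they share the
--     # same highest-bit bucket exactly when both reach <= 1 simultaneously,
--     # and the accumulator is then 2**(highest bit index).
--     a, b, p = left, right, 1
--     while a > 1 and b > 1:
--         a >>= 1
--         b >>= 1
--         p <<= 1
--     return p if a <= 1 and b <= 1 else 0
-- ===== Notes on version B (the rewrite author's own statement) =====
-- stated objective: alternative
-- what changed: Instead of computing each operand's highest-bit index separately with a doubling loop and comparing the two counts, B halves both operands in lockstep in a single loop while doubling an accumulator: they share a highest-bit bucket exactly when both reach <= 1 simultaneously, and the accumulator is then already the answer 2^k, so no exponentiation or index comparison is needed.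
import Mathlib
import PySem

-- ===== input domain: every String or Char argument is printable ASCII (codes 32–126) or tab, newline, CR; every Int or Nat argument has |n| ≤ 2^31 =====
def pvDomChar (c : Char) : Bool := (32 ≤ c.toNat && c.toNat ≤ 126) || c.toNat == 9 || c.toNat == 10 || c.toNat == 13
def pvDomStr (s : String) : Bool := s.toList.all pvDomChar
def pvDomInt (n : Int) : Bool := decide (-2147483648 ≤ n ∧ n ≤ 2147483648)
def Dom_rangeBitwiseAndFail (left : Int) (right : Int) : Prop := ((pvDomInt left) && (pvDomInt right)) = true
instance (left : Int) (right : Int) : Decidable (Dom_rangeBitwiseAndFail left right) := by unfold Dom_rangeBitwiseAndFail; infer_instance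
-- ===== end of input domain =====

-- B replaces A's two independent highest-bit doubling loops by a single lockstep halving
-- pass over both operands with a product accumulator (alternative decomposition, same cost).


-- ===== PORT A =====
-- while num * 2 <= n: count += 1; num *= 2   (the extra argument h is only a totality
-- invariant: num >= 1 holds at every iteration of the Python loop)
def pyHelperLoop (n : Int) (num : Int) (count : Int) (h : 1 ≤ num) : Int :=
  if num * 2 ≤ n then pyHelperLoop n (num * 2) (count + 1) (by omega) else count
termination_by (n - num).toNat
decreasing_by omega

def pyHelper (n : Int) : Int := pyHelperLoop n 1 0 (by omega)

def rangeBitwiseAndFail (left : Int) (right : Int) : Int :=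
  if left = 0 ∨ right = 0 then 0
  else if left = right then left
  else
    let left_result := pyHelper left
    let right_result := pyHelper right
    if left_result = right_result then 2 ^ left_result.toNat else 0

-- ===== PORT B =====
-- while a > 1 and b > 1: a >>= 1; b >>= 1; p <<= 1   then   p if a <= 1 and b <= 1 else 0
-- (a >> 1 is Python's floor halving, ported as PySem.Int.floordiv a 2)
def bLockstep (a b p : Int) : Int :=
  if 1 < a ∧ 1 < b then
    bLockstep (PySem.Int.floordiv a 2) (PySem.Int.floordiv b 2) (p * 2)
  else if a ≤ 1 ∧ b ≤ 1 then p else 0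
termination_by a.toNat
decreasing_by
  simp only [PySem.Int.floordiv_eq_ediv_of_pos (by omega : (0:Int) < 2)]
  omega

def rangeBitwiseAndFail_alt (left : Int) (right : Int) : Int :=
  if left = 0 ∨ right = 0 then 0
  else if left = right then left
  else bLockstep left right 1

-- ===== PRECONDITION & SPEC =====
def Spec_rangeBitwiseAndFail (left : Int) (right : Int) (out : Int) : Prop := out = rangeBitwiseAndFail_alt left right
instance (left : Int) (right : Int) (out : Int) : Decidable (Spec_rangeBitwiseAndFail left right out) := by unfold Spec_rangeBitwiseAndFail; infer_instance

-- ===== CLAIM (what is proved, stated in full; the proofs are below) =====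
def Claim_equal_rangeBitwiseAndFail : Prop := ∀ (left : Int) (right : Int), Dom_rangeBitwiseAndFail left right → Spec_rangeBitwiseAndFail left right (rangeBitwiseAndFail left right)

-- ===== LEMMAS AND PROOFS =====

-- effective highest-bit index: floor(log2 n) for n > 1, 0 otherwise
def hbIdx (n : Int) : Nat := if 1 < n then Nat.log2 n.toNat else 0

theorem hbIdx_half (a : Int) (ha : 1 < a) :
    hbIdx a = hbIdx (PySem.Int.floordiv a 2) + 1 := by
  rw [PySem.Int.floordiv_eq_ediv_of_pos (by omega : (0:Int) < 2)]
  unfold hbIdx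
  have h2 : (a / 2).toNat = a.toNat / 2 := by omega
  split_ifs with hfa
  · -- a / 2 > 1, i.e. a ≥ 4
    rw [h2, Nat.log2_eq_log_two, Nat.log2_eq_log_two, Nat.log_div_base]
    have := Nat.log_pos (b := 2) (by norm_num) (show 2 ≤ a.toNat by omega)
    omega
  · -- a ∈ {2, 3}: a / 2 = 1
    have h23 : a.toNat = 2 ∨ a.toNat = 3 := by omega
    rcases h23 with h | h <;> rw [h] <;> decide

theorem hbIdx_pos (a : Int) (ha : 1 < a) : 1 ≤ hbIdx a := by
  unfold hbIdx
  rw [if_pos ha, Nat.log2_eq_log_two]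
  have := Nat.log_pos (b := 2) (by norm_num) (show 2 ≤ a.toNat by omega)
  omega

theorem bLockstep_eq (a b p : Int) :
    bLockstep a b p = if hbIdx a = hbIdx b then p * 2 ^ hbIdx a else 0 := by
  rw [bLockstep]
  split
  case isTrue hc =>
    obtain ⟨ha, hb⟩ := hc
    rw [bLockstep_eq]
    rw [hbIdx_half a ha, hbIdx_half b hb]
    by_cases h : hbIdx (PySem.Int.floordiv a 2) = hbIdx (PySem.Int.floordiv b 2)
    · rw [if_pos h, if_pos (by omega)]
      ring
    · rw [if_neg h, if_neg (by omega)]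
  case isFalse hc =>
    split
    case isTrue hle =>
      have h1 : hbIdx a = 0 := by unfold hbIdx; rw [if_neg (by omega)]
      have h2 : hbIdx b = 0 := by unfold hbIdx; rw [if_neg (by omega)]
      simp [h1, h2]
    case isFalse hle =>
      rcases (show (1 < a ∧ b ≤ 1) ∨ (a ≤ 1 ∧ 1 < b) by omega) with ⟨h1, h2⟩ | ⟨h1, h2⟩
      · have := hbIdx_pos a h1
        have hz : hbIdx b = 0 := by unfold hbIdx; rw [if_neg (by omega)]
        rw [if_neg (by omega)]
      · have := hbIdx_pos b h2
        have hz : hbIdx a = 0 := by unfold hbIdx; rw [if_neg (by omega)]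
        rw [if_neg (by omega)]
termination_by a.toNat
decreasing_by
  simp only [PySem.Int.floordiv_eq_ediv_of_pos (by omega : (0:Int) < 2)]
  omega

theorem pyHelperLoop_eq (m v c : Int) (hv : 1 ≤ v) :
    pyHelperLoop m v c hv = c + (Nat.log2 (m.toNat / v.toNat) : Int) := by
  rw [pyHelperLoop]
  split
  case isTrue hc =>
    rw [pyHelperLoop_eq m (v * 2) (c + 1) (by omega)]
    have hnum : v.toNat * 2 ≤ m.toNat := by omega
    have h2 : 2 ≤ m.toNat / v.toNat :=
      (Nat.le_div_iff_mul_le (by omega)).mpr (by omega)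
    have hcast : (v * 2).toNat = v.toNat * 2 := by omega
    have hl : Nat.log2 (m.toNat / v.toNat / 2) + 1 = Nat.log2 (m.toNat / v.toNat) := by
      rw [Nat.log2_eq_log_two, Nat.log2_eq_log_two, Nat.log_div_base]
      have := Nat.log_pos (b := 2) (by norm_num) h2
      omega
    rw [hcast, ← Nat.div_div_eq_div_mul]
    push_cast [← hl]; ring
  case isFalse hc =>
    have hlt : m.toNat / v.toNat < 2 := by
      by_contra hge
      have h2 : 2 ≤ m.toNat / v.toNat := by omega
      have := (Nat.le_div_iff_mul_le (show 0 < v.toNat by omega)).mp h2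
      omega
    rw [Nat.log2_eq_log_two, Nat.log_of_lt hlt]
    simp
termination_by (m - v).toNat
decreasing_by omega

theorem pyHelper_eq_hbIdx (n : Int) : pyHelper n = (hbIdx n : Int) := by
  unfold pyHelper hbIdx
  rw [pyHelperLoop_eq]
  simp only [Int.toNat_one, Nat.div_one]
  split_ifs with h1
  · simp
  · rcases (show n.toNat = 0 ∨ n.toNat = 1 by omega) with h | h <;> simp [h, Nat.log2]

-- ===== VERDICT (by name: the statement is the Claim_ definition above) =====
theorem rangeBitwiseAndFail_spec : Claim_equal_rangeBitwiseAndFail := by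
  unfold Claim_equal_rangeBitwiseAndFail Spec_rangeBitwiseAndFail
  intro left right _
  unfold rangeBitwiseAndFail rangeBitwiseAndFail_alt
  simp only [pyHelper_eq_hbIdx, bLockstep_eq, Nat.cast_inj, one_mul, Int.toNat_natCast]
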